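-- pv_equiv track=rewrite | github.com/Kodeks67/HomeWork-Python | HomeWork Python/HomeWork 3/Task 2.py | find_closest_numbers
-- ===== SOURCE A (Python) =====
-- def find_closest_numbers(list_1, k):
--     closest_numbers = []
--     min_diff = None
--
--     for num in list_1:
--         diff = abs(k - num)
--
--         if not closest_numbers:
--             closest_numbers.append(num)
--             min_diff = diff
--         elif diff <= min_diff:
--             if diff < min_diff:
--                 closest_numbers.clear()
--             closest_numbers.append(num)
--             min_diff = diff
--
--     return closest_numbers
-- ===== SOURCE B (Python) =====
-- def find_closest_numbers(list_1, k):
--     if not list_1: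
--         return []
--     min_diff = min(abs(k - num) for num in list_1)
--     return [num for num in list_1 if abs(k - num) == min_diff]
-- ===== Notes on version B (the rewrite author's own statement) =====
-- stated objective: simpler
-- what changed: Replaces A's single stateful loop that clears and rebuilds the result on each improvement with a reduction pass computing the minimum absolute difference followed by a filter collecting the tied elements.
import Mathlib
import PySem

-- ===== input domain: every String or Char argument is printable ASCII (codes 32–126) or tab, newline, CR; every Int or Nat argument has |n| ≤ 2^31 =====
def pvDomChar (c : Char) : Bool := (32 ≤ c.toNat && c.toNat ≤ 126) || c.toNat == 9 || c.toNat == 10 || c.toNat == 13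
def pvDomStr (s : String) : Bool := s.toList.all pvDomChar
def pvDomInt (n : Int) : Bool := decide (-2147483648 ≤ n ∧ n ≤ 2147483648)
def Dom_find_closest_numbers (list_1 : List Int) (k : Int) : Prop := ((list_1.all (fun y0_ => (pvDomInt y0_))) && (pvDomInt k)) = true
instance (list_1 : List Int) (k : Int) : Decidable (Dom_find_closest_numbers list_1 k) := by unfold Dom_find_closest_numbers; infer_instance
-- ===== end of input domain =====

-- B replaces A's stateful clear-on-improvement loop by a min-reduction pass plus a filter pass (simpler decomposition, same O(n) cost).

-- ===== PORT A =====
-- one loop step of A: state = (closest_numbers, min_diff)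
def fcnStep (k : Int) (s : List Int × Option Int) (num : Int) : List Int × Option Int :=
  let diff := |k - num|
  if s.1 = [] then (s.1 ++ [num], some diff)
  else
    match s.2 with
    | none => s            -- unreachable: min_diff is set whenever closest_numbers is nonempty
    | some m =>
      if diff ≤ m then ((if diff < m then [] else s.1) ++ [num], some diff)
      else s

def find_closest_numbers (list_1 : List Int) (k : Int) : List Int :=
  (list_1.foldl (fcnStep k) ([], none)).1

-- ===== PORT B =====
def find_closest_numbers_alt (list_1 : List Int) (k : Int) : List Int :=
  match list_1 with
  | [] => []
  | x :: xs =>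
    let min_diff := xs.foldl (fun acc num => min acc |k - num|) |k - x|
    list_1.filter (fun num => |k - num| = min_diff)

-- ===== PRECONDITION & SPEC =====
def Spec_find_closest_numbers (list_1 : List Int) (k : Int) (out : List Int) : Prop := out = find_closest_numbers_alt list_1 k
instance (list_1 : List Int) (k : Int) (out : List Int) : Decidable (Spec_find_closest_numbers list_1 k out) := by unfold Spec_find_closest_numbers; infer_instance

-- ===== CLAIM (what is proved, stated in full; the proofs are below) =====
def Claim_equal_find_closest_numbers : Prop := ∀ (list_1 : List Int) (k : Int), Dom_find_closest_numbers list_1 k → Spec_find_closest_numbers list_1 k (find_closest_numbers list_1 k)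

-- ===== LEMMAS AND PROOFS =====

theorem fcn_foldl_min_le (k : Int) (xs : List Int) (a : Int) :
    xs.foldl (fun acc num => min acc |k - num|) a ≤ a := by
  induction xs generalizing a with
  | nil => simp
  | cons x xs ih =>
    simp only [List.foldl_cons]
    exact le_trans (ih (min a |k - x|)) (min_le_left _ _)

-- invariant: from a nonempty list c with recorded minimum m, A's loop over xs yields
-- (the kept prefix elements if m stays minimal, followed by the tied elements of xs; the new minimum)
theorem fcn_foldl_inv (k : Int) (xs : List Int) (c : List Int) (m : Int) (hc : c ≠ []) :
    xs.foldl (fcnStep k) (c, some m) =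
      ((if xs.foldl (fun acc num => min acc |k - num|) m < m then [] else c)
         ++ xs.filter (fun num => |k - num| = xs.foldl (fun acc num => min acc |k - num|) m),
       some (xs.foldl (fun acc num => min acc |k - num|) m)) := by
  induction xs generalizing c m with
  | nil => simp
  | cons x xs ih =>
    simp only [List.foldl_cons, List.filter_cons]
    have hmin : xs.foldl (fun acc num => min acc |k - num|) (min m |k - x|)
        ≤ min m |k - x| := fcn_foldl_min_le k xs _
    by_cases hle : |k - x| ≤ m
    · by_cases hlt : |k - x| < m
      · -- strict improvement: list cleared, restarted from [x]
        have hstep : fcnStep k (c, some m) x = ([x], some |k - x|) := by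
          simp [fcnStep, hc, hle, hlt]
        rw [hstep, ih [x] |k - x| (by simp)]
        have hm : min m |k - x| = |k - x| := min_eq_right (le_of_lt hlt)
        simp only [hm]
        have hle0 := fcn_foldl_min_le k xs |k - x|
        generalize hg : xs.foldl (fun acc num => min acc |k - num|) |k - x| = m' at hle0 ⊢
        have hlt2 : m' < m := lt_of_le_of_lt hle0 hlt
        simp only [if_pos hlt2]
        by_cases h2 : m' < |k - x|
        · have hne : ¬ (|k - x| = m') := by omega
          simp [h2, hne]
        · have heq : |k - x| = m' := le_antisymm (by omega) hle0
          simp [heq]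
      · -- tie: append x, keep c
        have heq : |k - x| = m := le_antisymm hle (by omega)
        have hstep : fcnStep k (c, some m) x = (c ++ [x], some |k - x|) := by
          simp [fcnStep, hc, hle, hlt]
        rw [hstep, ih (c ++ [x]) |k - x| (by simp)]
        have hm : min m |k - x| = |k - x| := by omega
        simp only [hm]
        simp only [heq]
        have hle0 := fcn_foldl_min_le k xs m
        generalize hg : xs.foldl (fun acc num => min acc |k - num|) m = m' at hle0 ⊢
        by_cases h2 : m' < m
        · have hne : ¬ (m = m') := by omega
          simp [h2, hne]
        · have heq2 : m = m' := le_antisymm (by omega) hle0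
          simp [← heq2]
    · -- worse: state unchanged
      have hstep : fcnStep k (c, some m) x = (c, some m) := by
        simp [fcnStep, hc, hle]
      rw [hstep, ih c m hc]
      have hm : min m |k - x| = m := min_eq_left (by omega)
      simp only [hm]
      have hle0 := fcn_foldl_min_le k xs m
      generalize hg : xs.foldl (fun acc num => min acc |k - num|) m = m' at hle0 ⊢
      have hne : ¬ (|k - x| = m') := by omega
      simp [hne]

-- ===== VERDICT (by name: the statement is the Claim_ definition above) =====
theorem find_closest_numbers_spec : Claim_equal_find_closest_numbers := by
  intro list_1 k _
  show find_closest_numbers list_1 k = find_closest_numbers_alt list_1 k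
  cases list_1 with
  | nil => rfl
  | cons x xs =>
    have hstep : fcnStep k ([], none) x = ([x], some |k - x|) := by simp [fcnStep]
    unfold find_closest_numbers find_closest_numbers_alt
    simp only [List.foldl_cons, hstep]
    rw [fcn_foldl_inv k xs [x] |k - x| (by simp)]
    have hle0 := fcn_foldl_min_le k xs |k - x|
    generalize hg : xs.foldl (fun acc num => min acc |k - num|) |k - x| = m' at hle0 ⊢
    simp only [List.filter_cons]
    by_cases h2 : m' < |k - x|
    · have hne : ¬ (|k - x| = m') := by omega
      simp [h2, hne]
    · have heq : |k - x| = m' := le_antisymm (by omega) hle0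
      simp [heq]
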